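-- pv_equiv track=rewrite | github.com/CCamposD/Tp-TDA-Asincronico | Tercera_Parte/main.py | intentar_colocar_barco
-- ===== SOURCE A (Python) =====
-- def es_valida(tablero, fila, columna, largo, direccion):
--
--     ancho = len(tablero[0])
--     alto = len(tablero)
--
--
--
--     if direccion == "H" and columna + largo > ancho:
--         return False
--
--     if direccion == "V" and fila + largo > alto:
--         return False
--
--
--
--     for i in range(largo):
--
--         if direccion == "H":
--
--             if not esta_espacio_libre(tablero, fila, columna + i):
--
--                 return False
--
--         elif direccion == "V":
--             if not esta_espacio_libre(tablero, fila + i, columna):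
--
--                 return False
--
--     return True
--
-- def esta_espacio_libre(tablero, fila, columna):
--
--     alto = len(tablero)
--     ancho = len(tablero[0])
--
--     for i in range(-1, 2):
--
--         for j in range(-1, 2):
--
--             nueva_fila = fila + i
--             nueva_columna = columna + j
--
--             if 0 <= nueva_fila < alto and 0 <= nueva_columna < ancho:
--
--                 if tablero[nueva_fila][nueva_columna] == 1:
--
--                     return False
--
--     return True
--
-- def colocar_barco(tablero, fila, columna, largo, direccion):
--
--     for i in range(largo):
--
--         if direccion == "H":
--             tablero[fila][columna + i] = 1
--
--         elif direccion == "V":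
--             tablero[fila + i][columna] = 1
--
-- def intentar_colocar_barco(tablero, largo):
--
--     for fila in range(len(tablero)):
--         for columna in range(len(tablero[0])):
--             for direccion in ["H", "V"]:
--
--                 if es_valida(tablero, fila, columna, largo, direccion):
--                     colocar_barco(tablero, fila, columna, largo, direccion)
--                     return True
--     return False
-- ===== SOURCE B (Python) =====
-- def _runs(celdas):
--     # suffix run-lengths: _runs(xs)[i] = number of consecutive True values starting at i
--     out = []
--     run = 0
--     for libre in reversed(celdas):
--         run = run + 1 if libre else 0
--         out.append(run)
--     out.reverse()
--     return out
--
-- def intentar_colocar_barco(tablero, largo):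
--     alto = len(tablero)
--     ancho = len(tablero[0]) if tablero else 0
--     # a cell can carry a ship part iff its whole (clamped) 3x3 neighbourhood is empty:
--     # precompute that once per cell, then turn it into run-length tables so each
--     # candidate placement is a single O(1) comparison.
--     libre = [[all(tablero[nf][nc] != 1
--                   for nf in range(max(f - 1, 0), min(f + 1, alto - 1) + 1)
--                   for nc in range(max(c - 1, 0), min(c + 1, ancho - 1) + 1))
--               for c in range(ancho)]
--              for f in range(alto)]
--     rh = [_runs(fila) for fila in libre]
--     rv = [_runs([fila[c] for fila in libre]) for c in range(ancho)]
--     for f in range(alto):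
--         for c in range(ancho):
--             if rh[f][c] >= largo:
--                 for i in range(largo):
--                     tablero[f][c + i] = 1
--                 return True
--             if rv[c][f] >= largo:
--                 for i in range(largo):
--                     tablero[f + i][c] = 1
--                 return True
--     return False
-- ===== Notes on version B (the rewrite author's own statement) =====
-- stated objective: alternative
-- what changed: B precomputes a free-cell mask (cells whose clamped 3x3 neighbourhood holds no 1) once and turns it into suffix run-length tables per row and per column, so each candidate placement is a single table comparison, where A re-scans the 3x3 neighbourhood of every ship cell for every candidate; Pre_ excludes ragged boards with a row shorter than the first row, on which A's indexing can raise IndexError.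
-- outside the precondition, e.g. on intentar_colocar_barco([[0, 0, 0], [0, 0]], 1): A returns True, B raises IndexError; on intentar_colocar_barco([[1, 0, 0], [0, 0]], 1): A raises IndexError, B raises IndexError
import Mathlib
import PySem

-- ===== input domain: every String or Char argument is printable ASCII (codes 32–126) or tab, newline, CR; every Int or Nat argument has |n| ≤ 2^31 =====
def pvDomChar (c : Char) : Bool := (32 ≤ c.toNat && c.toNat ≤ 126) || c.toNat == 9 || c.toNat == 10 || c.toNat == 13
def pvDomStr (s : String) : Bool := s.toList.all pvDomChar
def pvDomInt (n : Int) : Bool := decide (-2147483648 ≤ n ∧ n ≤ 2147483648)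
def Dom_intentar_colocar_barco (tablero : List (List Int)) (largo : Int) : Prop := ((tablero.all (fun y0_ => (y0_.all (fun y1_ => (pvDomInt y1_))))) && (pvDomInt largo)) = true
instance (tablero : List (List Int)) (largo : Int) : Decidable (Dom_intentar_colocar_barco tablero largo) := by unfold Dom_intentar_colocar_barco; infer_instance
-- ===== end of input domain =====

-- B precomputes a free-cell (3x3-clearance) mask once and suffix run-length tables per row
-- and per column, so each candidate placement is one table comparison, instead of A's per-ship-cell
-- 3x3 rescans per candidate. Equivalence is about the RETURN value only (both Pythons additionally
-- write 1 into the board cells of the placed ship — they write to the same cells).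

-- ===== PORT A =====
-- tablero[f][c]; both Pythons read it only under their own 0 ≤ index < len guards (exact there)
def pvCell (t : List (List Int)) (f c : Int) : Int :=
  (t.getD f.toNat []).getD c.toNat 0

def esta_espacio_libre (t : List (List Int)) (fila columna : Int) : Bool :=
  let alto : Int := t.length
  let ancho : Int := (t.headD []).length   -- len(tablero[0]); reached only under the 0 ≤ nc < ancho guard
  ([-1, 0, 1] : List Int).all fun i =>
    ([-1, 0, 1] : List Int).all fun j =>
      let nf := fila + i
      let nc := columna + j
      !(decide (0 ≤ nf ∧ nf < alto ∧ 0 ≤ nc ∧ nc < ancho) && decide (pvCell t nf nc = 1))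

def es_valida (t : List (List Int)) (fila columna largo : Int) (direccion : String) : Bool :=
  let ancho : Int := (t.headD []).length
  let alto : Int := t.length
  if direccion == "H" && decide (columna + largo > ancho) then false
  else if direccion == "V" && decide (fila + largo > alto) then false
  else (PySem.List.pyRange 0 largo 1).all fun i =>
    if direccion == "H" then esta_espacio_libre t fila (columna + i)
    else if direccion == "V" then esta_espacio_libre t (fila + i) columna
    else true

def intentar_colocar_barco (tablero : List (List Int)) (largo : Int) : Bool :=
  (PySem.List.pyRange 0 tablero.length 1).any fun fila =>
    (PySem.List.pyRange 0 (tablero.headD []).length 1).any fun columna =>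
      (["H", "V"] : List String).any fun direccion =>
        es_valida tablero fila columna largo direccion

-- ===== PORT B =====
-- _runs: backwards pass appending the running count, then reverse (the Lean fold conses
-- where the Python appends-then-reverses once more; same values, same order in the result)
def runs (celdas : List Bool) : List Nat :=
  (celdas.reverse.foldl
    (fun (st : List Nat × Nat) libre =>
      let run := if libre then st.2 + 1 else 0
      (run :: st.1, run))
    ([], 0)).1

-- the all(...) over the clamped 3x3 neighbourhood of (f, c)
def celda_libre (t : List (List Int)) (f c : Int) : Bool :=
  let alto : Int := t.length
  let ancho : Int := (t.headD []).length
  (PySem.List.pyRange (max (f-1) 0) (min (f+1) (alto-1) + 1) 1).all fun nf =>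
    (PySem.List.pyRange (max (c-1) 0) (min (c+1) (ancho-1) + 1) 1).all fun nc =>
      decide (pvCell t nf nc ≠ 1)

def intentar_colocar_barco_alt (tablero : List (List Int)) (largo : Int) : Bool :=
  let alto : Int := tablero.length
  let ancho : Int := (tablero.headD []).length
  let libre : List (List Bool) :=
    (PySem.List.pyRange 0 alto 1).map fun f =>
      (PySem.List.pyRange 0 ancho 1).map fun c => celda_libre tablero f c
  let rh : List (List Nat) := libre.map runs
  let rv : List (List Nat) :=
    (PySem.List.pyRange 0 ancho 1).map fun c =>
      runs (libre.map fun fila => PySem.List.pyGetD fila c false)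
  (PySem.List.pyRange 0 alto 1).any fun f =>
    (PySem.List.pyRange 0 ancho 1).any fun c =>
      decide (largo ≤ ((PySem.List.pyGetD (PySem.List.pyGetD rh f []) c 0 : Nat) : Int))
      || decide (largo ≤ ((PySem.List.pyGetD (PySem.List.pyGetD rv c []) f 0 : Nat) : Int))

-- ===== PRECONDITION & SPEC =====
-- Pre_ excludes ragged boards with a row shorter than the first row, on which the
-- in-bounds-guarded indexing (guards use len(tablero[0])) can raise IndexError.
def Pre_intentar_colocar_barco (tablero : List (List Int)) (largo : Int) : Prop :=
  ∀ row ∈ tablero, (tablero.headD []).length ≤ row.length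

instance (tablero : List (List Int)) (largo : Int) : Decidable (Pre_intentar_colocar_barco tablero largo) := by
  unfold Pre_intentar_colocar_barco; infer_instance

def pvWitness_intentar_colocar_barco : List (List Int) × Int := ([[0]], 1)

def Spec_intentar_colocar_barco (tablero : List (List Int)) (largo : Int) (out : Bool) : Prop := out = intentar_colocar_barco_alt tablero largo
instance (tablero : List (List Int)) (largo : Int) (out : Bool) : Decidable (Spec_intentar_colocar_barco tablero largo out) := by unfold Spec_intentar_colocar_barco; infer_instance

-- ===== CLAIM (what is proved, stated in full; the proofs are below) =====
def Claim_equal_intentar_colocar_barco : Prop := ∀ (tablero : List (List Int)) (largo : Int), Dom_intentar_colocar_barco tablero largo → Pre_intentar_colocar_barco tablero largo → Spec_intentar_colocar_barco tablero largo (intentar_colocar_barco tablero largo)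

-- ===== LEMMAS AND PROOFS =====

-- structural view of runs: runs (b :: rest) conses the head's suffix run
def runsSpec : List Bool → List Nat
  | [] => []
  | b :: rest => (if b then (runsSpec rest).headD 0 + 1 else 0) :: runsSpec rest

theorem runs_aux (celdas : List Bool) :
    celdas.reverse.foldl
      (fun (st : List Nat × Nat) libre =>
        let run := if libre then st.2 + 1 else 0
        (run :: st.1, run)) ([], 0)
      = (runsSpec celdas, (runsSpec celdas).headD 0) := by
  induction celdas with
  | nil => rfl
  | cons b rest ih =>
    simp only [List.reverse_cons, List.foldl_append, ih, List.foldl_cons, List.foldl_nil]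
    simp [runsSpec]

theorem runs_eq_runsSpec (celdas : List Bool) : runs celdas = runsSpec celdas := by
  unfold runs; rw [runs_aux]

-- characterization of the run-length table: k ≤ runsSpec row [c] ↔ k consecutive trues from c
theorem headD_eq_getD (l : List Nat) : l.headD 0 = l.getD 0 0 := by cases l <;> rfl

theorem runsSpec_ge_iff (row : List Bool) (c k : Nat) (hc : c < row.length) :
    k ≤ (runsSpec row).getD c 0 ↔
      c + k ≤ row.length ∧ ∀ i < k, row.getD (c + i) false = true := by
  induction row generalizing c k with
  | nil => simp at hc
  | cons b rest ih =>
    cases c with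
    | succ c' =>
      have hc' : c' < rest.length := by simpa using hc
      simp only [runsSpec, List.getD_cons_succ, List.length_cons]
      rw [ih c' k hc']
      constructor
      · rintro ⟨h1, h2⟩
        refine ⟨by omega, fun i hi => ?_⟩
        have := h2 i hi
        simpa [Nat.succ_add] using this
      · rintro ⟨h1, h2⟩
        refine ⟨by omega, fun i hi => ?_⟩
        have := h2 i hi
        simpa [Nat.succ_add] using this
    | zero =>
      cases k with
      | zero => simp
      | succ k' =>
        simp only [runsSpec, List.getD_cons_zero, List.length_cons]
        by_cases hb : b
        · subst hb
          cases rest with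
          | nil =>
            simp only [runsSpec, if_true, List.headD_nil, List.length_nil]
            constructor
            · intro h
              have : k' = 0 := by omega
              subst this
              exact ⟨by omega, by intro i hi; interval_cases i; simp⟩
            · rintro ⟨h1, _⟩; omega
          | cons x rest' =>
            rw [if_pos rfl, headD_eq_getD]
            have hlen : 0 < (x :: rest').length := by simp
            constructor
            · intro h
              have hk : k' ≤ (runsSpec (x :: rest')).getD 0 0 := by omega
              rw [ih 0 k' hlen] at hk
              refine ⟨by simp at hk ⊢; omega, fun i hi => ?_⟩
              cases i with
              | zero => simp
              | succ i' =>
                have := hk.2 i' (by omega)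
                simpa using this
            · rintro ⟨h1, h2⟩
              have hk : k' ≤ (runsSpec (x :: rest')).getD 0 0 := by
                rw [ih 0 k' hlen]
                refine ⟨by simp at h1 ⊢; omega, fun i hi => ?_⟩
                have := h2 (i + 1) (by omega)
                simpa using this
              omega
        · simp only [if_neg hb]
          constructor
          · intro h; omega
          · rintro ⟨_, h2⟩
            have := h2 0 (by omega)
            simp at this
            exact absurd this hb

-- B's 3x3 mask as a proposition over the clamped rectangle
theorem celda_iff (t : List (List Int)) (f c : Int) :
    celda_libre t f c = true ↔
    ∀ r cc : Int, max (f-1) 0 ≤ r → r ≤ min (f+1) ((t.length:Int) - 1) →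
      max (c-1) 0 ≤ cc → cc ≤ min (c+1) ((((t.headD []).length:Int)) - 1) →
      pvCell t r cc ≠ 1 := by
  simp only [celda_libre, List.all_eq_true, PySem.List.mem_pyRange_one, decide_eq_true_eq]
  constructor
  · intro h r cc h1 h2 h3 h4
    exact h r ⟨h1, by omega⟩ cc ⟨h3, by omega⟩
  · intro h r hr cc hc
    exact h r cc hr.1 (by omega) hc.1 (by omega)

-- A's 3x3 neighbourhood loop covers the same clamped rectangle
theorem libre_iff (t : List (List Int)) (f c : Int) :
    esta_espacio_libre t f c = true ↔
    ∀ r cc : Int, max (f-1) 0 ≤ r → r ≤ min (f+1) ((t.length:Int) - 1) →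
      max (c-1) 0 ≤ cc → cc ≤ min (c+1) ((((t.headD []).length:Int)) - 1) →
      pvCell t r cc ≠ 1 := by
  simp only [esta_espacio_libre, List.all_eq_true, List.mem_cons,
    Bool.not_eq_true', Bool.and_eq_false_iff, decide_eq_false_iff_not, not_and]
  constructor
  · intro h r cc h1 h2 h3 h4
    have := h (r - f) (by omega) (cc - c) (by omega)
    rcases this with hcon | hne
    · have := hcon (by omega) (by omega) (by omega); omega
    · rwa [show f + (r - f) = r from by ring, show c + (cc - c) = cc from by ring] at hne
  · intro h x hx y hy
    have hx' : x = -1 ∨ x = 0 ∨ x = 1 := by simpa using hx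
    have hy' : y = -1 ∨ y = 0 ∨ y = 1 := by simpa using hy
    by_cases hb : 0 ≤ f + x ∧ f + x < (t.length:Int) ∧ 0 ≤ c + y ∧ c + y < ((t.headD []).length:Int)
    · exact Or.inr (h (f + x) (c + y) (by omega) (by omega) (by omega) (by omega))
    · exact Or.inl fun a1 a2 a3 a4 => hb ⟨a1, a2, a3, a4⟩

theorem esta_eq_celda (t : List (List Int)) (f c : Int) :
    esta_espacio_libre t f c = celda_libre t f c := by
  rw [Bool.eq_iff_iff, libre_iff, celda_iff]

-- B's run-table test at one cell, rephrased as a bound check plus an all over the ship cells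
theorem run_test_iff (W : Nat) (g : Int → Bool) (L c : Int)
    (h0 : 0 ≤ c) (h1 : c < (W:Int)) :
    decide (L ≤ (((runsSpec ((PySem.List.pyRange 0 (W:Int) 1).map g)).getD c.toNat 0 : Nat) : Int))
      = (decide (c + L ≤ (W:Int)) && (PySem.List.pyRange 0 L 1).all fun i => g (c + i)) := by
  have hlen : ((PySem.List.pyRange 0 (W:Int) 1).map g).length = W := by
    simp [PySem.List.length_pyRange_one]
  have hget : ∀ j : Nat, j < W → ((PySem.List.pyRange 0 (W:Int) 1).map g).getD j false = g j := by
    intro j hj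
    have := PySem.List.pyGetD_map_pyRange g W j false hj
    simpa [PySem.List.pyGetD_natCast] using this
  by_cases hL : L ≤ 0
  · rw [PySem.List.pyRange_one_eq_nil hL]
    simp only [List.all_nil, Bool.and_true]
    rw [decide_eq_true (by omega : L ≤ ((((runsSpec ((PySem.List.pyRange 0 (W:Int) 1).map g)).getD c.toNat 0 : Nat)) : Int))]
    rw [decide_eq_true (by omega : c + L ≤ (W:Int))]
  · have hk : L = ((L.toNat : Nat) : Int) := by omega
    have hc' : c.toNat < W := by omega
    rw [Bool.eq_iff_iff]
    simp only [decide_eq_true_eq, Bool.and_eq_true, List.all_eq_true, PySem.List.mem_pyRange_one]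
    rw [hk, Nat.cast_le, runsSpec_ge_iff _ _ _ (by omega : c.toNat < ((PySem.List.pyRange 0 (W:Int) 1).map g).length)]
    rw [hlen]
    constructor
    · rintro ⟨ha, hb⟩
      refine ⟨by omega, fun i hi => ?_⟩
      have := hb i.toNat (by omega)
      rw [hget _ (by omega)] at this
      have he : ((c.toNat + i.toNat : Nat) : Int) = c + i := by omega
      rwa [he] at this
    · rintro ⟨ha, hb⟩
      refine ⟨by omega, fun i hi => ?_⟩
      rw [hget _ (by omega)]
      have := hb ((i : Int)) ⟨by omega, by omega⟩
      have he : ((c.toNat + i : Nat) : Int) = c + (i : Int) := by omega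
      rwa [he]

-- A's es_valida, unfolded for each direction
theorem valida_H_eq (t : List (List Int)) (f c L : Int) :
    es_valida t f c L "H" =
      (decide (c + L ≤ ((t.headD []).length : Int))
        && (PySem.List.pyRange 0 L 1).all fun i => esta_espacio_libre t f (c + i)) := by
  have e1 : (("H":String) == "H") = true := rfl
  have e2 : (("H":String) == "V") = false := rfl
  by_cases hb : c + L > ((t.headD []).length : Int)
  · simp only [es_valida, e1, e2, Bool.true_and, Bool.false_and, decide_eq_true_eq,
      if_pos hb, Bool.false_eq_true, if_false, decide_eq_false (by omega : ¬ c + L ≤ ((t.headD []).length : Int))]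
  · simp only [es_valida, e1, e2, Bool.true_and, Bool.false_and, decide_eq_true_eq,
      Bool.false_eq_true, if_false, if_neg hb,
      decide_eq_true (by omega : c + L ≤ ((t.headD []).length : Int)), if_true]

theorem valida_V_eq (t : List (List Int)) (f c L : Int) :
    es_valida t f c L "V" =
      (decide (f + L ≤ ((t.length : Nat) : Int))
        && (PySem.List.pyRange 0 L 1).all fun i => esta_espacio_libre t (f + i) c) := by
  have e1 : (("V":String) == "H") = false := rfl
  have e2 : (("V":String) == "V") = true := rfl
  by_cases hb : f + L > ((t.length : Nat) : Int)
  · simp only [es_valida, e1, e2, Bool.true_and, Bool.false_and, decide_eq_true_eq,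
      if_pos hb, Bool.false_eq_true, if_false, decide_eq_false (by omega : ¬ f + L ≤ ((t.length : Nat) : Int))]
  · simp only [es_valida, e1, e2, Bool.true_and, Bool.false_and, decide_eq_true_eq,
      Bool.false_eq_true, if_false, if_neg hb,
      decide_eq_true (by omega : f + L ≤ ((t.length : Nat) : Int)), if_true]

-- pointwise: at an in-board (f, c), A's H/V validity pair equals B's two run-table tests
theorem pointwise_eq (t : List (List Int)) (L f c : Int)
    (hf : 0 ≤ f ∧ f < (t.length : Int))
    (hc : 0 ≤ c ∧ c < ((t.headD []).length : Int)) :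
    (es_valida t f c L "H" || es_valida t f c L "V") =
      (decide (L ≤ (((runsSpec ((PySem.List.pyRange 0 ((t.headD []).length : Int) 1).map
            fun cc => celda_libre t f cc)).getD c.toNat 0 : Nat) : Int))
       || decide (L ≤ (((runsSpec ((PySem.List.pyRange 0 (t.length : Int) 1).map
            fun ff => celda_libre t ff c)).getD f.toNat 0 : Nat) : Int))) := by
  rw [run_test_iff ((t.headD []).length) (fun cc => celda_libre t f cc) L c hc.1 hc.2,
      run_test_iff (t.length) (fun ff => celda_libre t ff c) L f hf.1 hf.2,
      valida_H_eq, valida_V_eq]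
  have h1 : (fun i => esta_espacio_libre t f (c + i)) = (fun i => celda_libre t f (c + i)) := by
    funext i; exact esta_eq_celda t f (c + i)
  have h2 : (fun i => esta_espacio_libre t (f + i) c) = (fun i => celda_libre t (f + i) c) := by
    funext i; exact esta_eq_celda t (f + i) c
  rw [h1, h2]

theorem intentar_eq_alt (t : List (List Int)) (L : Int) :
    intentar_colocar_barco t L = intentar_colocar_barco_alt t L := by
  unfold intentar_colocar_barco intentar_colocar_barco_alt
  simp only [List.map_map, Function.comp_def]
  refine PySem.List.any_congr_mem ?_
  intro f hf
  refine PySem.List.any_congr_mem ?_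
  intro c hc
  rw [PySem.List.mem_pyRange_one] at hf hc
  -- reduce B's table lookups to runsSpec of the generating row / column
  have hrh : PySem.List.pyGetD
      ((PySem.List.pyRange 0 (t.length : Int) 1).map
        (fun ff => runs ((PySem.List.pyRange 0 ((t.headD []).length : Int) 1).map fun cc => celda_libre t ff cc))) f [] =
      runs ((PySem.List.pyRange 0 ((t.headD []).length : Int) 1).map fun cc => celda_libre t f cc) :=
    PySem.List.pyGetD_map_pyRange_of_nonneg _ _ _ _ hf.1 hf.2
  have hcol : ∀ x ∈ PySem.List.pyRange 0 (t.length : Int) 1,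
      PySem.List.pyGetD ((PySem.List.pyRange 0 ((t.headD []).length : Int) 1).map fun cc => celda_libre t x cc) c false
        = celda_libre t x c := by
    intro x _
    exact PySem.List.pyGetD_map_pyRange_of_nonneg _ _ _ _ hc.1 hc.2
  have hrv : PySem.List.pyGetD
      ((PySem.List.pyRange 0 ((t.headD []).length : Int) 1).map fun cc =>
        runs ((PySem.List.pyRange 0 (t.length : Int) 1).map fun ff =>
          PySem.List.pyGetD ((PySem.List.pyRange 0 ((t.headD []).length : Int) 1).map fun cc2 => celda_libre t ff cc2) cc false)) c [] =
      runs ((PySem.List.pyRange 0 (t.length : Int) 1).map fun ff =>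
        PySem.List.pyGetD ((PySem.List.pyRange 0 ((t.headD []).length : Int) 1).map fun cc2 => celda_libre t ff cc2) c false) :=
    PySem.List.pyGetD_map_pyRange_of_nonneg _ _ _ _ hc.1 hc.2
  rw [hrh, hrv, List.map_congr_left hcol]
  have hcf : c = ((c.toNat : Nat) : Int) := by omega
  have hff : f = ((f.toNat : Nat) : Int) := by omega
  rw [show PySem.List.pyGetD (runs ((PySem.List.pyRange 0 ((t.headD []).length : Int) 1).map fun cc => celda_libre t f cc)) c 0
        = (runsSpec ((PySem.List.pyRange 0 ((t.headD []).length : Int) 1).map fun cc => celda_libre t f cc)).getD c.toNat 0 by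
      rw [hcf, PySem.List.pyGetD_natCast, runs_eq_runsSpec, Int.toNat_natCast],
      show PySem.List.pyGetD (runs ((PySem.List.pyRange 0 (t.length : Int) 1).map fun ff => celda_libre t ff c)) f 0
        = (runsSpec ((PySem.List.pyRange 0 (t.length : Int) 1).map fun ff => celda_libre t ff c)).getD f.toNat 0 by
      rw [hff, PySem.List.pyGetD_natCast, runs_eq_runsSpec, Int.toNat_natCast]]
  have := pointwise_eq t L f c ⟨hf.1, hf.2⟩ ⟨hc.1, hc.2⟩
  simp only [List.any_cons, List.any_nil, Bool.or_false] at this ⊢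
  exact this

-- ===== VERDICT (by name: the statement is the Claim_ definition above) =====
theorem intentar_colocar_barco_spec : Claim_equal_intentar_colocar_barco := by
  intro t L _ _
  unfold Spec_intentar_colocar_barco
  exact intentar_eq_alt t L
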